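-- pv_equiv track=rewrite | github.com/DiamondLightSource/aa-remove-data | src/aa_remove_data/remove_data.py | keep_every_nth
-- ===== SOURCE A (Python) =====
-- def keep_every_nth(
--     samples: list, n: int, block_size: int = 1, initial: int = 0
-- ) -> list:
--     """Reduce the size of a list of samples, keeping every nth sample and
--     removing the rest. The samples can be grouped together into blocks, so
--     that every nth block is kept.
--
--     Args:
--         samples (list): List of samples
--         n (int): Every nth sample (or block of samples) will be kept.
--         block_size (int, optional): Number of samples per block. Defaults to 1.
--         initial (int, optional): End point of processing from a previous chunk.
--
--     Returns:
--         list: Reduced list of samples.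
--     """
--     if n <= 0:
--         raise ValueError(f"n = {n}, must be >= 1")
--     elif block_size <= 0:
--         raise ValueError(f"block_size = {block_size}, must be >= 1")
--     if block_size == 1:
--         return samples[n - 1 - initial :: n]
--     else:
--         return [
--             item
--             for i, item in enumerate(samples)
--             if (i + block_size + initial) // block_size % n == 0
--         ]
-- ===== SOURCE B (Python) =====
-- def keep_every_nth(
--     samples: list, n: int, block_size: int = 1, initial: int = 0
-- ) -> list:
--     """Keep every nth block of samples (block-striding: jump from kept
--     block to kept block and copy each one with a slice)."""
--     if n <= 0:
--         raise ValueError(f"n = {n}, must be >= 1")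
--     elif block_size <= 0:
--         raise ValueError(f"block_size = {block_size}, must be >= 1")
--     # Global index g = i + initial lies in block g // block_size; a block b
--     # is kept iff (b + 1) % n == 0, i.e. b % n == n - 1.
--     first_block = initial // block_size
--     b = first_block + (n - 1 - first_block) % n  # first kept block
--     end = initial + len(samples)
--     out = []
--     while b * block_size < end:
--         lo = max(b * block_size - initial, 0)
--         hi = (b + 1) * block_size - initial
--         out.extend(samples[lo:hi])
--         b += n
--     return out
-- ===== Notes on version B (the rewrite author's own statement) =====
-- stated objective: faster
-- what changed: B replaces A's per-element enumerate-and-filter (and its special-cased extended slice) by one block-striding loop that jumps directly from kept block to kept block and copies each kept block with a single contiguous slice, touching only kept elements.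
-- intended difference: When block_size == 1 and initial is outside [0, n-1], A's slice start n-1-initial goes negative (Python wraps it to the end of the list) or overshoots, so A returns a tail chosen by index wraparound (e.g. [2] on ([0,1,2], 2, 1, 2)) instead of every nth global sample; B returns [1], the value A's own general-case block formula gives, which is the intended meaning of initial as a global offset. — e.g. on keep_every_nth([0, 1, 2], 2, 1, 2): A returns [2], B returns [1]
import Mathlib
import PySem

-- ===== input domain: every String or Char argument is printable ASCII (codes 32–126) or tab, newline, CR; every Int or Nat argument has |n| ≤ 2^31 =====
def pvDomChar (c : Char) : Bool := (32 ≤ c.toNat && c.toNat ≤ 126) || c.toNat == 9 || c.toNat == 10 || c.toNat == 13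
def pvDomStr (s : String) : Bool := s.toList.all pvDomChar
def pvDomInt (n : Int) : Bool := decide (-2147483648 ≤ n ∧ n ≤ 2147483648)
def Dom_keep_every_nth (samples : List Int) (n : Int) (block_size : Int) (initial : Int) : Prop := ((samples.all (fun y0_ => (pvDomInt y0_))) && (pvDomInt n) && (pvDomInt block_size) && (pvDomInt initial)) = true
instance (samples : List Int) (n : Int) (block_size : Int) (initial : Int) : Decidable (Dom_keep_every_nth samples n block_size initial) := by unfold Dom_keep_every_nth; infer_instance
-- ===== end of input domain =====

-- B replaces A's per-element filter (and its special-cased extended slice for block_size == 1) by one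
-- block-striding loop that jumps from kept block to kept block, copying each with a contiguous slice.

-- ===== PORT A =====
-- Python A: validate n, then block_size (ValueError, outside Pre_); for block_size == 1 the extended
-- slice samples[n-1-initial::n]; otherwise a comprehension over enumerate(samples).
def keep_every_nth (samples : List Int) (n : Int) (block_size : Int) (initial : Int) : List Int :=
  if n ≤ 0 then []                     -- Python: raise ValueError (excluded by Pre_)
  else if block_size ≤ 0 then []       -- Python: raise ValueError (excluded by Pre_)
  else if block_size = 1 then
    (PySem.List.slice? samples (some (n - 1 - initial)) none n).getD []   -- step n ≥ 1 ≠ 0, never none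
  else
    (PySem.List.enumerate samples 0).filterMap (fun p =>
      if PySem.Int.mod (PySem.Int.floordiv (p.1 + block_size + initial) block_size) n = 0
      then some p.2 else none)

-- ===== PORT B =====
-- the while loop of Source B: emit slice [max(b*bs-initial,0) : (b+1)*bs-initial] for b, b+n, … while
-- b*bs < end (fuel only makes the recursion structural; the caller passes enough for every iteration)
def pvLoop (fuel : Nat) (samples : List Int) (n : Int) (block_size : Int) (initial : Int)
    (endI : Int) (b : Int) : List Int :=
  match fuel with
  | 0 => []
  | Nat.succ fuel' =>
    if b * block_size < endI then
      PySem.List.slice samples (some (max (b * block_size - initial) 0))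
          (some ((b + 1) * block_size - initial))
        ++ pvLoop fuel' samples n block_size initial endI (b + n)
    else []

def keep_every_nth_alt (samples : List Int) (n : Int) (block_size : Int) (initial : Int) : List Int :=
  if n ≤ 0 then []                     -- Python: raise ValueError (excluded by Pre_)
  else if block_size ≤ 0 then []       -- Python: raise ValueError (excluded by Pre_)
  else
    let first_block := PySem.Int.floordiv initial block_size
    let b := first_block + PySem.Int.mod (n - 1 - first_block) n
    pvLoop ((initial + (samples.length : Int) - b * block_size).toNat + 1)
      samples n block_size initial (initial + (samples.length : Int)) b

-- ===== PRECONDITION & SPEC =====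
-- Pre_ excludes exactly the inputs on which Python A raises ValueError (n <= 0 or block_size <= 0).
def Pre_keep_every_nth (samples : List Int) (n : Int) (block_size : Int) (initial : Int) : Prop :=
  1 ≤ n ∧ 1 ≤ block_size
instance (samples : List Int) (n : Int) (block_size : Int) (initial : Int) : Decidable (Pre_keep_every_nth samples n block_size initial) := by unfold Pre_keep_every_nth; infer_instance
def pvWitness_keep_every_nth : List Int × Int × Int × Int := ([1, 2, 3, 4, 5, 6], 2, 2, 0)

-- When block_size == 1 and initial is outside [0, n-1], A's slice start n-1-initial wraps around or
-- overshoots, so A returns an index-wraparound tail instead of every nth global sample; B returns the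
-- value A's own general-case block formula gives, the intended meaning of initial as a global offset.
def D_keep_every_nth (samples : List Int) (n : Int) (block_size : Int) (initial : Int) : Prop :=
  block_size = 1 ∧ 1 ≤ n ∧ 0 < (samples.length : Int) ∧
    ((initial < 0 ∧ PySem.Int.mod (n - 1 - initial) n < (samples.length : Int)) ∨
     (n ≤ initial ∧
       max ((samples.length : Int) + (n - 1 - initial)) 0 ≠ PySem.Int.mod (n - 1 - initial) n))
instance (samples : List Int) (n : Int) (block_size : Int) (initial : Int) : Decidable (D_keep_every_nth samples n block_size initial) := by unfold D_keep_every_nth; infer_instance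

def Spec_keep_every_nth (samples : List Int) (n : Int) (block_size : Int) (initial : Int) (out : List Int) : Prop := ¬ D_keep_every_nth samples n block_size initial → out = keep_every_nth_alt samples n block_size initial
instance (samples : List Int) (n : Int) (block_size : Int) (initial : Int) (out : List Int) : Decidable (Spec_keep_every_nth samples n block_size initial out) := by unfold Spec_keep_every_nth; infer_instance

def pvDiffWitness_keep_every_nth : List Int × Int × Int × Int := ([0, 1, 2], 2, 1, 2)
def pvDiffWitnessOut_keep_every_nth : (List Int) × (List Int) := ([2], [1])

-- ===== CLAIM (what is proved, stated in full; the proofs are below) =====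
def Claim_unchanged_keep_every_nth : Prop := ∀ (samples : List Int) (n : Int) (block_size : Int) (initial : Int), Dom_keep_every_nth samples n block_size initial → Pre_keep_every_nth samples n block_size initial → Spec_keep_every_nth samples n block_size initial (keep_every_nth samples n block_size initial)
def Claim_changed_keep_every_nth : Prop := Dom_keep_every_nth (pvDiffWitness_keep_every_nth.1) (pvDiffWitness_keep_every_nth.2.1) (pvDiffWitness_keep_every_nth.2.2.1) (pvDiffWitness_keep_every_nth.2.2.2) ∧ Pre_keep_every_nth (pvDiffWitness_keep_every_nth.1) (pvDiffWitness_keep_every_nth.2.1) (pvDiffWitness_keep_every_nth.2.2.1) (pvDiffWitness_keep_every_nth.2.2.2) ∧ D_keep_every_nth (pvDiffWitness_keep_every_nth.1) (pvDiffWitness_keep_every_nth.2.1) (pvDiffWitness_keep_every_nth.2.2.1) (pvDiffWitness_keep_every_nth.2.2.2) ∧ keep_every_nth (pvDiffWitness_keep_every_nth.1) (pvDiffWitness_keep_every_nth.2.1) (pvDiffWitness_keep_every_nth.2.2.1) (pvDiffWitness_keep_every_nth.2.2.2) = pvDiffWitnessOut_keep_every_nth.1 ∧ keep_every_nth_alt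 (pvDiffWitness_keep_every_nth.1) (pvDiffWitness_keep_every_nth.2.1) (pvDiffWitness_keep_every_nth.2.2.1) (pvDiffWitness_keep_every_nth.2.2.2) = pvDiffWitnessOut_keep_every_nth.2 ∧ pvDiffWitnessOut_keep_every_nth.1 ≠ pvDiffWitnessOut_keep_every_nth.2

-- ===== LEMMAS AND PROOFS =====

-- canonical selector: the elements of xs whose (running, Int-valued) index satisfies p,
-- the counter starting at j
def pvSel (xs : List Int) (p : Int → Bool) (j : Int) : List Int :=
  match xs with
  | [] => []
  | x :: r => if p j then x :: pvSel r p (j + 1) else pvSel r p (j + 1)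

theorem pvSel_congr (xs : List Int) (p q : Int → Bool) (j : Int)
    (h : ∀ k, j ≤ k → k < j + xs.length → p k = q k) : pvSel xs p j = pvSel xs q j := by
  induction xs generalizing j with
  | nil => rfl
  | cons x r ih =>
    have h0 : p j = q j := h j (le_refl _) (by simp only [List.length_cons]; push_cast; omega)
    have h1 : pvSel r p (j + 1) = pvSel r q (j + 1) :=
      ih (j + 1) (fun k hk1 hk2 =>
        h k (by omega) (by simp only [List.length_cons]; push_cast at hk2 ⊢; omega))
    simp only [pvSel, h0, h1]

theorem pvSel_false (xs : List Int) (p : Int → Bool) (j : Int)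
    (h : ∀ k, j ≤ k → p k = false) : pvSel xs p j = [] := by
  induction xs generalizing j with
  | nil => rfl
  | cons x r ih =>
    simp only [pvSel, h j (le_refl _)]
    simpa using ih (j + 1) (fun k hk => h k (by omega))

theorem pvSel_split (xs : List Int) (p q : Int → Bool) (j c : Int)
    (hp : ∀ k, p k = true → k < c) (hq : ∀ k, q k = true → c ≤ k) :
    pvSel xs (fun k => p k || q k) j = pvSel xs p j ++ pvSel xs q j := by
  induction xs generalizing j with
  | nil => rfl
  | cons x r ih =>
    simp only [pvSel]
    by_cases hpj : p j = true
    · have hqj : q j = false := by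
        by_contra hc
        have h1 := hq j (by revert hc; cases q j <;> simp)
        have h2 := hp j hpj
        omega
      simp [hpj, hqj, ih]
    · by_cases hqj : q j = true
      · have hcj : c ≤ j := hq j hqj
        have hpr : pvSel r p (j + 1) = [] := by
          apply pvSel_false
          intro k hk
          by_contra hc
          have h1 := hp k (by revert hc; cases p k <;> simp)
          omega
        simp only [Bool.eq_false_iff] at hpj
        simp [hpj, hqj, ih, hpr]
      · simp only [Bool.eq_false_iff] at hpj hqj
        simp [hpj, hqj, ih]

-- from at/after the left edge: a prefix take
theorem pvSel_take (xs : List Int) (a c j : Int) (hj : a ≤ j) :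
    pvSel xs (fun k => decide (a ≤ k) && decide (k < c)) j = xs.take (c - j).toNat := by
  induction xs generalizing j with
  | nil => simp [pvSel]
  | cons x r ih =>
    by_cases hlt : j < c
    · have h1 : (decide (a ≤ j) && decide (j < c)) = true := by simp; omega
      have h2 : (c - j).toNat = (c - (j + 1)).toNat + 1 := by omega
      simp only [pvSel, h1, if_true, ih (j + 1) (by omega), h2, List.take_succ_cons]
    · have h1 : (decide (a ≤ j) && decide (j < c)) = false := by simp; omega
      have h2 : (c - j).toNat = 0 := by omega
      simp only [pvSel, h1, Bool.false_eq_true, if_false, h2, List.take_zero]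
      apply pvSel_false
      intro k hk
      simp; omega

-- interval predicate: a contiguous drop/take
theorem pvSel_interval (xs : List Int) (a c j : Int) (hj : j ≤ a) :
    pvSel xs (fun k => decide (a ≤ k) && decide (k < c)) j
      = (xs.drop (a - j).toNat).take (c - a).toNat := by
  induction xs generalizing j with
  | nil => simp [pvSel]
  | cons x r ih =>
    by_cases hja : j = a
    · rw [pvSel_take (x :: r) a c j (by omega)]
      have h1 : (a - j).toNat = 0 := by omega
      have h2 : c - j = c - a := by omega
      simp [h1, h2]
    · have h1 : (decide (a ≤ j) && decide (j < c)) = false := by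
        by_cases h : j < c <;> simp <;> omega
      have h2 : (a - j).toNat = (a - (j + 1)).toNat + 1 := by omega
      simp only [pvSel, h1, Bool.false_eq_true, if_false, ih (j + 1) (by omega), h2,
        List.drop_succ_cons]

-- pvSel as a filtered index range (membership/ordering normal form)
theorem pvSel_eq_filter (xs : List Int) (p : Int → Bool) (j : Int) :
    pvSel xs p j = ((List.range xs.length).filter (fun i : Nat => p (j + (i : Int)))).map
      (fun i : Nat => xs.getD i 0) := by
  induction xs generalizing j with
  | nil => simp [pvSel]
  | cons x r ih =>
    simp only [pvSel, List.length_cons, List.range_succ_eq_map, List.filter_cons]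
    have hmap : (List.map Nat.succ (List.range r.length)).filter (fun i : Nat => p (j + (i : Int)))
        = List.map Nat.succ ((List.range r.length).filter
            (fun i : Nat => p (j + ((Nat.succ i : Nat) : Int)))) := by
      rw [List.filter_map]; rfl
    have hrest : (List.map Nat.succ ((List.range r.length).filter
          (fun i : Nat => p (j + ((Nat.succ i : Nat) : Int))))).map (fun i : Nat => (x :: r).getD i 0)
        = ((List.range r.length).filter (fun i : Nat => p ((j + 1) + (i : Int)))).map
            (fun i : Nat => r.getD i 0) := by
      rw [List.map_map]
      have hfeq : (fun i : Nat => p (j + ((Nat.succ i : Nat) : Int)))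
          = (fun i : Nat => p ((j + 1) + (i : Int))) := by
        funext i; congr 1; push_cast; ring
      rw [hfeq]
      apply List.map_congr_left
      intro i _
      simp [Nat.succ_eq_add_one, List.getD_cons_succ]
    by_cases hpj : p j = true
    · simp only [Int.natCast_zero, add_zero, hpj, if_true, List.map_cons, List.getD_cons_zero]
      rw [hmap, hrest, ih (j + 1)]
    · simp only [Int.natCast_zero, add_zero, hpj, Bool.false_eq_true, if_false]
      rw [hmap, hrest, ih (j + 1)]

-- shift of the counter
theorem pvSel_shift (xs : List Int) (p : Int → Bool) (d : Int) :
    pvSel xs p d = pvSel xs (fun g => p (g + d)) 0 := by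
  rw [pvSel_eq_filter, pvSel_eq_filter]
  congr 2
  funext i
  congr 1
  ring

-- enumerate/filterMap (port A's comprehension) as pvSel
theorem pvEnum_filterMap_sel (xs : List Int) (C : Int → Prop) [DecidablePred C] (i0 d : Int) :
    (PySem.List.enumerate xs i0).filterMap (fun p => if C p.1 then some p.2 else none)
      = pvSel xs (fun g => decide (C (g - d))) (i0 + d) := by
  induction xs generalizing i0 with
  | nil => simp [PySem.List.enumerate_nil, pvSel]
  | cons x r ih =>
    rw [PySem.List.enumerate_cons]
    simp only [List.filterMap_cons, pvSel]
    have h0 : i0 + d - d = i0 := by ring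
    simp only [h0]
    have h1 : i0 + 1 + d = i0 + d + 1 := by ring
    by_cases hq : C i0
    · simp only [hq, if_true]
      rw [ih (i0 + 1), h1]
      simp
    · simp only [hq, if_false]
      rw [ih (i0 + 1), h1]
      simp

-- ===== arithmetic helpers =====

theorem pvEmodCongr {n a b : Int} (h : n ∣ b - a) : a % n = b % n := Int.modEq_iff_dvd.mpr h

theorem pvDvd_self_sub_emod (a n : Int) : n ∣ a - a % n := by
  refine ⟨a / n, ?_⟩
  have h := Int.emod_def a n
  linarith

theorem pvSucc_emod (x n : Int) (hn : 1 ≤ n) : ((x + 1) % n = 0) ↔ (x % n = n - 1) := by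
  have hm0 : 0 ≤ x % n := Int.emod_nonneg x (by omega)
  have hm1 : x % n < n := Int.emod_lt_of_pos x (by omega)
  have he : (x + 1) % n = (x % n + 1) % n := by
    apply pvEmodCongr
    have := pvDvd_self_sub_emod x n
    have h2 : x % n + 1 - (x + 1) = -(x - x % n) := by ring
    rw [h2]
    exact dvd_neg.mpr this
  by_cases hc : x % n = n - 1
  · rw [he, hc]
    have h4 : n - 1 + 1 = n := by ring
    rw [h4, Int.emod_self]
    simp [hc]
  · have h3 : (x % n + 1) % n = x % n + 1 := Int.emod_eq_of_lt (by omega) (by omega)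
    rw [he, h3]
    constructor
    · intro h; omega
    · intro h; omega

theorem pvMod_step (b n : Int) (hn : 1 ≤ n) (hb : b % n = n - 1) : (b + n) % n = n - 1 := by
  have he : (b + n) % n = b % n := by
    apply pvEmodCongr
    have : b - (b + n) = -n := by ring
    rw [this]
    exact dvd_neg.mpr ⟨1, by ring⟩
  rw [he, hb]

theorem pvKeep_iff (n bs g : Int) (hn : 1 ≤ n) (hbs : 1 ≤ bs) :
    (PySem.Int.mod (PySem.Int.floordiv (g + bs) bs) n = 0) ↔ (g / bs) % n = n - 1 := by
  rw [PySem.Int.mod_eq_emod_of_pos (by omega), PySem.Int.floordiv_eq_ediv_of_pos (by omega)]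
  have h1 : (g + bs) / bs = g / bs + 1 := by
    have h := Int.add_mul_ediv_right g 1 (show bs ≠ 0 by omega)
    simpa using h
  rw [h1]
  exact pvSucc_emod (g / bs) n hn

theorem pvBand_emod (b t n : Int) (hn : 1 ≤ n) (hb : b % n = n - 1) (ht : 1 ≤ t) (htn : t < n) :
    (b + t) % n ≠ n - 1 := by
  have he : (b + t) % n = (t - 1) % n := by
    apply pvEmodCongr
    have h1 := pvDvd_self_sub_emod b n
    rw [hb] at h1
    have h2 : t - 1 - (b + t) = -(b - (n - 1)) - n := by ring
    rw [h2]
    exact dvd_sub (dvd_neg.mpr h1) ⟨1, by ring⟩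
  have h3 : (t - 1) % n = t - 1 := Int.emod_eq_of_lt (by omega) (by omega)
  rw [he, h3]
  omega

theorem pvFirst_kept (n fb B : Int) (hn : 1 ≤ n) (hfb : fb ≤ B) (hB : B % n = n - 1) :
    fb + (n - 1 - fb) % n ≤ B := by
  set m := (n - 1 - fb) % n with hm
  have hm0 : 0 ≤ m := Int.emod_nonneg _ (by omega)
  have hm1 : m < n := Int.emod_lt_of_pos _ (by omega)
  have hd1 : n ∣ (n - 1 - fb) - m := pvDvd_self_sub_emod (n - 1 - fb) n
  have hd2 : n ∣ B - (n - 1) := by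
    have := pvDvd_self_sub_emod B n
    rwa [hB] at this
  have hd : n ∣ B - (fb + m) := by
    have he : B - (fb + m) = (B - (n - 1)) + ((n - 1 - fb) - m) := by ring
    rw [he]
    exact dvd_add hd2 hd1
  obtain ⟨k, hk⟩ := hd
  by_contra hc
  push_neg at hc
  have hkneg : n * k < 0 := by omega
  have hkgt : -n < n * k := by omega
  have hk1 : k ≤ -1 := by nlinarith
  nlinarith

-- the one-block decomposition of the kept-predicate (b a kept block number)
theorem pvBlock_pred (n bs b g : Int) (hn : 1 ≤ n) (hbs : 1 ≤ bs) (hb : b % n = n - 1) :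
    (decide (b * bs ≤ g) && decide (PySem.Int.mod (PySem.Int.floordiv (g + bs) bs) n = 0))
    = ((decide (b * bs ≤ g) && decide (g < (b + 1) * bs))
       || (decide ((b + n) * bs ≤ g)
            && decide (PySem.Int.mod (PySem.Int.floordiv (g + bs) bs) n = 0))) := by
  have hk := pvKeep_iff n bs g hn hbs
  by_cases h1 : b * bs ≤ g
  · by_cases h2 : g < (b + 1) * bs
    · have hgd : g / bs = b := by
        have ha : b ≤ g / bs := (Int.le_ediv_iff_mul_le (by omega)).mpr h1
        have hbb : g / bs < b + 1 := (Int.ediv_lt_iff_lt_mul (by omega)).mpr h2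
        omega
      have hkeep : PySem.Int.mod (PySem.Int.floordiv (g + bs) bs) n = 0 := by
        rw [hk, hgd]; exact hb
      simp [h1, h2, hkeep]
    · by_cases h3 : (b + n) * bs ≤ g
      · simp [h1, h2, h3]
      · have hB1 : b + 1 ≤ g / bs := (Int.le_ediv_iff_mul_le (by omega)).mpr (by omega)
        have hB2 : g / bs < b + n := (Int.ediv_lt_iff_lt_mul (by omega)).mpr (by omega)
        have hne : (g / bs) % n ≠ n - 1 := by
          have h4 := pvBand_emod b (g / bs - b) n hn hb (by omega) (by omega)
          have h5 : b + (g / bs - b) = g / bs := by ring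
          rwa [h5] at h4
        have hkeep : ¬ PySem.Int.mod (PySem.Int.floordiv (g + bs) bs) n = 0 := fun hcc => hne (hk.mp hcc)
        simp [h1, h2, h3, hkeep]
  · have h3 : ¬ (b + n) * bs ≤ g := by
      have hmm : b * bs ≤ (b + n) * bs := by nlinarith
      omega
    simp [h1, h3]

-- the loop, given any sufficient fuel, selects the kept indices at or after block b
theorem pvLoop_sel (xs : List Int) (n bs initial : Int) (hn : 1 ≤ n) (hbs : 1 ≤ bs) :
    ∀ (fuel : Nat) (b : Int), b % n = n - 1 → initial < (b + 1) * bs →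
      (initial + (xs.length : Int) - b * bs).toNat < fuel →
      pvLoop fuel xs n bs initial (initial + (xs.length : Int)) b
        = pvSel xs (fun g => decide (b * bs ≤ g)
            && decide (PySem.Int.mod (PySem.Int.floordiv (g + bs) bs) n = 0)) initial := by
  intro fuel
  induction fuel with
  | zero => intro b _ _ hf; omega
  | succ fuel' ih =>
    intro b hmod hb2 hf
    have hnbs : 1 ≤ n * bs := by nlinarith
    by_cases hg : b * bs < initial + (xs.length : Int)
    · have hstep : pvLoop (Nat.succ fuel') xs n bs initial (initial + (xs.length : Int)) b
          = PySem.List.slice xs (some (max (b * bs - initial) 0)) (some ((b + 1) * bs - initial))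
            ++ pvLoop fuel' xs n bs initial (initial + (xs.length : Int)) (b + n) := by
        simp only [pvLoop, if_pos hg]
      rw [hstep]
      have hfun : (fun g => decide (b * bs ≤ g)
            && decide (PySem.Int.mod (PySem.Int.floordiv (g + bs) bs) n = 0))
          = (fun g => ((decide (b * bs ≤ g) && decide (g < (b + 1) * bs))
              || (decide ((b + n) * bs ≤ g)
                  && decide (PySem.Int.mod (PySem.Int.floordiv (g + bs) bs) n = 0)))) := by
        funext g
        exact pvBlock_pred n bs b g hn hbs hmod
      rw [hfun]
      rw [pvSel_split xs _ _ initial ((b + 1) * bs)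
        (by intro k hk; simp at hk; omega)
        (by
          intro k hk
          simp at hk
          have hmm : (b + 1) * bs ≤ (b + n) * bs := by nlinarith
          omega)]
      have hrec : pvLoop fuel' xs n bs initial (initial + (xs.length : Int)) (b + n)
          = pvSel xs (fun g => decide ((b + n) * bs ≤ g)
              && decide (PySem.Int.mod (PySem.Int.floordiv (g + bs) bs) n = 0)) initial := by
        apply ih (b + n) (pvMod_step b n hn hmod)
        · nlinarith
        · have he : (b + n) * bs = b * bs + n * bs := by ring
          omega
      rw [hrec]
      congr 1
      -- the emitted slice is the interval part
      have hhi : (0 : Int) ≤ (b + 1) * bs - initial := by omega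
      by_cases hin : initial ≤ b * bs
      · have hlo : max (b * bs - initial) 0 = b * bs - initial := by omega
        have he : (b + 1) * bs = b * bs + bs := by ring
        rw [hlo, PySem.List.slice_toNat xs (by omega) hhi,
          pvSel_interval xs (b * bs) ((b + 1) * bs) initial hin, he]
        congr 1
        omega
      · have hlo : max (b * bs - initial) 0 = 0 := by omega
        rw [hlo, PySem.List.slice_toNat xs (by omega) hhi]
        have hcongr : pvSel xs (fun k => decide (b * bs ≤ k) && decide (k < (b + 1) * bs)) initial
            = pvSel xs (fun k => decide (initial ≤ k) && decide (k < (b + 1) * bs)) initial := by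
          apply pvSel_congr
          intro k hk1 hk2
          have e1 : decide (b * bs ≤ k) = true := by simp; omega
          have e2 : decide (initial ≤ k) = true := by simp; omega
          rw [e1, e2]
        rw [hcongr, pvSel_take xs initial ((b + 1) * bs) initial (le_refl _)]
        simp
    · simp only [pvLoop, if_neg hg]
      have hcongr : pvSel xs (fun g => decide (b * bs ≤ g)
            && decide (PySem.Int.mod (PySem.Int.floordiv (g + bs) bs) n = 0)) initial
          = pvSel xs (fun _ => false) initial := by
        apply pvSel_congr
        intro k hk1 hk2
        have e1 : decide (b * bs ≤ k) = false := by simp; omega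
        rw [e1, Bool.false_and]
      rw [hcongr]
      exact (pvSel_false xs _ initial (fun _ _ => rfl)).symm

-- port B computes the kept-predicate selection
theorem pvAlt_sel (xs : List Int) (n bs initial : Int) (hn : 1 ≤ n) (hbs : 1 ≤ bs) :
    keep_every_nth_alt xs n bs initial
      = pvSel xs (fun g => decide (PySem.Int.mod (PySem.Int.floordiv (g + bs) bs) n = 0)) initial := by
  have h0 : keep_every_nth_alt xs n bs initial
      = pvLoop ((initial + (xs.length : Int)
            - (initial / bs + PySem.Int.mod (n - 1 - initial / bs) n) * bs).toNat + 1)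
          xs n bs initial (initial + (xs.length : Int))
          (initial / bs + PySem.Int.mod (n - 1 - initial / bs) n) := by
    simp only [keep_every_nth_alt, if_neg (show ¬ n ≤ 0 by omega),
      if_neg (show ¬ bs ≤ 0 by omega),
      PySem.Int.floordiv_eq_ediv_of_pos (show (0 : Int) < bs by omega)]
  rw [h0]
  rw [show PySem.Int.mod (n - 1 - initial / bs) n = (n - 1 - initial / bs) % n from
    PySem.Int.mod_eq_emod_of_pos (by omega)]
  set fb := initial / bs with hfb
  set m := (n - 1 - fb) % n with hm
  set b0 := fb + m with hb0
  have hm0 : 0 ≤ m := Int.emod_nonneg _ (by omega)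
  have hm1 : m < n := Int.emod_lt_of_pos _ (by omega)
  have hmod : b0 % n = n - 1 := by
    have hd1 : n ∣ (n - 1 - fb) - m := pvDvd_self_sub_emod (n - 1 - fb) n
    have he : b0 % n = (n - 1) % n := by
      apply pvEmodCongr
      have he2 : n - 1 - b0 = (n - 1 - fb) - m := by rw [hb0]; ring
      rw [he2]
      exact hd1
    rw [he]
    exact Int.emod_eq_of_lt (by omega) (by omega)
  have hb2 : initial < (b0 + 1) * bs := by
    have h1 : initial < (fb + 1) * bs := Int.lt_ediv_add_one_mul_self initial (by omega)
    have h2 : (fb + 1) * bs ≤ (b0 + 1) * bs := by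
      apply mul_le_mul_of_nonneg_right _ (by omega)
      omega
    omega
  rw [pvLoop_sel xs n bs initial hn hbs _ b0 hmod hb2 (by omega)]
  apply pvSel_congr
  intro k hk1 hk2
  by_cases hkeep : PySem.Int.mod (PySem.Int.floordiv (k + bs) bs) n = 0
  · have hB : (k / bs) % n = n - 1 := (pvKeep_iff n bs k hn hbs).mp hkeep
    have h1 : fb ≤ k / bs := Int.ediv_le_ediv (by omega) hk1
    have h2 : b0 ≤ k / bs := pvFirst_kept n fb (k / bs) hn h1 hB
    have h3 : b0 * bs ≤ (k / bs) * bs := mul_le_mul_of_nonneg_right h2 (by omega)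
    have h4 : (k / bs) * bs ≤ k := Int.ediv_mul_le k (by omega)
    have e1 : decide (b0 * bs ≤ k) = true := by simp; omega
    rw [e1, Bool.true_and]
  · have e1 : decide (PySem.Int.mod (PySem.Int.floordiv (k + bs) bs) n = 0) = false := by
      simp [hkeep]
    rw [e1, Bool.and_false]

-- ===== the block_size = 1 slice =====

theorem pvFilterMap_eq_map (l : List Nat) (f : Nat → Option Int) (g : Nat → Int)
    (h : ∀ x ∈ l, f x = some (g x)) : l.filterMap f = l.map g := by
  induction l with
  | nil => rfl
  | cons a r ih =>
    simp only [List.filterMap_cons, h a (by simp), List.map_cons]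
    rw [ih (fun x hx => h x (by simp [hx]))]

theorem pvProg_eq_filter (L : Nat) (T nn : Int) (hT0 : 0 ≤ T) (hn : 1 ≤ nn) (cnt : Nat)
    (hcnt : ∀ k : Nat, k < cnt ↔ T + nn * (k : Int) < L) :
    (List.range cnt).map (fun k : Nat => (T + nn * (k : Int)).toNat)
      = (List.range L).filter
          (fun i : Nat => decide (T ≤ (i : Int)) && decide (((i : Int) - T) % nn = 0)) := by
  have hnd1 : ((List.range cnt).map (fun k : Nat => (T + nn * (k : Int)).toNat)).Pairwise (· < ·) := by
    apply List.Pairwise.map _ _ List.pairwise_lt_range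
    intro a b hab
    have h1 : nn * (a : Int) < nn * (b : Int) :=
      mul_lt_mul_of_pos_left (by exact_mod_cast hab) (by omega)
    have h2 : 0 ≤ nn * (a : Int) := mul_nonneg (by omega) (by positivity)
    omega
  have hnd2 : ((List.range L).filter
      (fun i : Nat => decide (T ≤ (i : Int)) && decide (((i : Int) - T) % nn = 0))).Pairwise (· < ·) :=
    List.Pairwise.sublist List.filter_sublist List.pairwise_lt_range
  refine List.eq_of_perm_of_sorted (fun a b _ _ h1 h2 => Nat.le_antisymm h1 h2)
    (hnd1.imp Nat.le_of_lt) (hnd2.imp Nat.le_of_lt) ?_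
  apply (List.perm_ext_iff_of_nodup (hnd1.imp (fun h => Nat.ne_of_lt h))
    (hnd2.imp (fun h => Nat.ne_of_lt h))).mpr
  intro a
  simp only [List.mem_map, List.mem_range, List.mem_filter, Bool.and_eq_true, decide_eq_true_eq]
  constructor
  · rintro ⟨k, hk, rfl⟩
    have h1 : T + nn * (k : Int) < L := (hcnt k).mp hk
    have h2 : 0 ≤ nn * (k : Int) := mul_nonneg (by omega) (by positivity)
    refine ⟨by omega, by omega, ?_⟩
    have h3 : ((T + nn * (k : Int)).toNat : Int) = T + nn * (k : Int) := by omega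
    rw [h3, show T + nn * (k : Int) - T = nn * (k : Int) from by ring]
    exact Int.mul_emod_right nn (k : Int)
  · rintro ⟨haL, hTa, hmod⟩
    obtain ⟨k', hk'⟩ := Int.dvd_of_emod_eq_zero hmod
    have hk0 : 0 ≤ k' := by
      by_contra hc
      have : nn * k' < 0 := mul_neg_of_pos_of_neg (by omega) (by omega)
      omega
    lift k' to Nat using hk0 with k2
    exact ⟨k2, (hcnt k2).mpr (by omega), by omega⟩

theorem pvSlice_sel (xs : List Int) (nn s : Int) (hn : 1 ≤ nn) :
    (PySem.List.slice? xs (some s) none nn).getD []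
      = pvSel xs (fun i => decide ((if s < 0 then max (s + (xs.length : Int)) 0
            else min s (xs.length : Int)) ≤ i)
          && decide ((i - (if s < 0 then max (s + (xs.length : Int)) 0
            else min s (xs.length : Int))) % nn = 0)) 0 := by
  simp only [PySem.List.slice?, PySem.List.sliceIndices,
    if_neg (show ¬ nn = 0 by omega), if_neg (show ¬ nn < 0 by omega),
    if_pos (show 0 < nn by omega), Option.getD_some]
  set T := (if s < 0 then max (s + (xs.length : Int)) 0 else min s (xs.length : Int)) with hT
  have hT0 : 0 ≤ T := by rw [hT]; split_ifs <;> omega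
  have hTL : T ≤ (xs.length : Int) := by rw [hT]; split_ifs <;> omega
  have hbr : ∀ k : Nat,
      (k < if T < (xs.length : Int) then (((xs.length : Int) - T + nn - 1) / nn).toNat else 0)
        ↔ T + nn * (k : Int) < (xs.length : Int) := by
    intro k
    by_cases hTL2 : T < (xs.length : Int)
    · rw [if_pos hTL2]
      constructor
      · intro h
        have h2 : (k : Int) + 1 ≤ ((xs.length : Int) - T + nn - 1) / nn := by omega
        have h3 : ((k : Int) + 1) * nn ≤ (xs.length : Int) - T + nn - 1 :=
          (Int.le_ediv_iff_mul_le (by omega)).mp h2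
        have e : ((k : Int) + 1) * nn = nn * (k : Int) + nn := by ring
        linarith
      · intro h
        have e : ((k : Int) + 1) * nn = nn * (k : Int) + nn := by ring
        have h3 : ((k : Int) + 1) * nn ≤ (xs.length : Int) - T + nn - 1 := by linarith
        have h2 := (Int.le_ediv_iff_mul_le (show (0 : Int) < nn by omega)).mpr h3
        omega
    · rw [if_neg hTL2]
      have h2 : 0 ≤ nn * (k : Int) := mul_nonneg (by omega) (by positivity)
      constructor
      · intro h; omega
      · intro h; omega
  rw [pvFilterMap_eq_map _ _ (fun k : Nat => xs.getD (T + nn * (k : Int)).toNat 0)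
    (by
      intro k hk
      rw [List.mem_range] at hk
      have h1 : T + nn * (k : Int) < (xs.length : Int) := (hbr k).mp hk
      have h2 : 0 ≤ nn * (k : Int) := mul_nonneg (by omega) (by positivity)
      have h3 : (T + nn * (k : Int)).toNat < xs.length := by omega
      simp [List.getD_eq_getElem?_getD, List.getElem?_eq_getElem h3])]
  rw [pvSel_eq_filter]
  simp only [zero_add]
  rw [← pvProg_eq_filter xs.length T nn hT0 hn _ hbr, List.map_map]
  rfl

-- pointwise agreement of the slice predicate and the kept-predicate for block_size = 1,
-- outside the divergence region D_
theorem pvEmod_le_self (a n : Int) (ha : 0 ≤ a) (hn : 0 < n) : a % n ≤ a := by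
  have h1 : a % n = a - n * (a / n) := by
    have h := Int.emod_def a n
    linarith
  have h2 : 0 ≤ a / n := Int.ediv_nonneg ha (by omega)
  nlinarith

theorem pvResidue_iff (i r n : Int) (hn : 1 ≤ n) (hi : 0 ≤ i) (hr0 : 0 ≤ r) (hr1 : r < n) :
    (r ≤ i ∧ (i - r) % n = 0) ↔ i % n = r := by
  constructor
  · rintro ⟨h1, h2⟩
    have hd : n ∣ i - r := Int.dvd_of_emod_eq_zero h2
    have h3 : i % n = r % n := pvEmodCongr (by rwa [show r - i = -(i - r) from by ring, dvd_neg])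
    rw [h3, Int.emod_eq_of_lt hr0 hr1]
  · intro h
    have h2 : r % n = r := Int.emod_eq_of_lt hr0 hr1
    have h3 : (i - r) % n = 0 := by
      rw [← Int.emod_eq_emod_iff_emod_sub_eq_zero, h, h2]
    have h4 : i % n ≤ i := pvEmod_le_self i n hi (by omega)
    exact ⟨by omega, h3⟩

theorem pvQ_iff (i initial n : Int) (hn : 1 ≤ n) :
    ((i + initial + 1) % n = 0) ↔ i % n = (n - 1 - initial) % n := by
  have h1 : (i + initial + 1) % n = (i - (n - 1 - initial)) % n :=
    pvEmodCongr ⟨-1, by ring⟩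
  rw [h1, ← Int.emod_eq_emod_iff_emod_sub_eq_zero]

theorem pvPointwise_bs1 (L n initial i : Int) (hn : 1 ≤ n) (hi0 : 0 ≤ i) (hiL : i < L)
    (hnd1 : initial < 0 → L ≤ (n - 1 - initial) % n)
    (hnd2 : n ≤ initial → max (L + (n - 1 - initial)) 0 = (n - 1 - initial) % n) :
    ((decide ((if n - 1 - initial < 0 then max (n - 1 - initial + L) 0
          else min (n - 1 - initial) L) ≤ i))
      && decide ((i - (if n - 1 - initial < 0 then max (n - 1 - initial + L) 0
          else min (n - 1 - initial) L)) % n = 0))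
    = decide (PySem.Int.mod (PySem.Int.floordiv (i + initial + 1) 1) n = 0) := by
  have hfd : PySem.Int.floordiv (i + initial + 1) 1 = i + initial + 1 := by
    rw [PySem.Int.floordiv_eq_ediv_of_pos (by omega), Int.ediv_one]
  have hmd : PySem.Int.mod (i + initial + 1) n = (i + initial + 1) % n :=
    PySem.Int.mod_eq_emod_of_pos (by omega)
  rw [hfd, hmd, show ∀ (p q : Prop) (_ : Decidable p) (_ : Decidable q),
      (decide p && decide q) = decide (p ∧ q) from fun p q _ _ => by
        by_cases hp : p <;> by_cases hq : q <;> simp [hp, hq]]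
  apply decide_eq_decide.mpr
  rw [pvQ_iff i initial n hn]
  have hr0 : 0 ≤ (n - 1 - initial) % n := Int.emod_nonneg _ (by omega)
  have hr1 : (n - 1 - initial) % n < n := Int.emod_lt_of_pos _ (by omega)
  by_cases hs : n - 1 - initial < 0
  · have hinit : n ≤ initial := by omega
    have ht0 : max (L + (n - 1 - initial)) 0 = (n - 1 - initial) % n := hnd2 hinit
    have ht : max (n - 1 - initial + L) 0 = (n - 1 - initial) % n := by
      rw [show n - 1 - initial + L = L + (n - 1 - initial) from by ring, ht0]
    simp only [if_pos hs, ht]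
    exact pvResidue_iff i _ n hn hi0 hr0 hr1
  · simp only [if_neg hs]
    by_cases hin : initial < 0
    · have hLr : L ≤ (n - 1 - initial) % n := hnd1 hin
      have hmin : min (n - 1 - initial) L = L := by omega
      rw [hmin]
      constructor
      · rintro ⟨h1, _⟩; omega
      · intro h
        have h2 : i % n = i := Int.emod_eq_of_lt hi0 (by omega)
        omega
    · have hrs : (n - 1 - initial) % n = n - 1 - initial :=
        Int.emod_eq_of_lt (by omega) (by omega)
      by_cases hsL : n - 1 - initial < L
      · have hmin : min (n - 1 - initial) L = n - 1 - initial := by omega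
        rw [hmin, hrs]
        exact pvResidue_iff i (n - 1 - initial) n hn hi0 (by omega) (by omega)
      · have hmin : min (n - 1 - initial) L = L := by omega
        rw [hmin]
        constructor
        · rintro ⟨h1, _⟩; omega
        · intro h
          have h2 : i % n = i := Int.emod_eq_of_lt hi0 (by omega)
          omega

-- port A's general-branch comprehension, instantiated
theorem pvA_general (xs : List Int) (n bs initial : Int) :
    (PySem.List.enumerate xs 0).filterMap (fun p =>
      if PySem.Int.mod (PySem.Int.floordiv (p.1 + bs + initial) bs) n = 0 then some p.2 else none)
    = pvSel xs (fun g => decide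
        (PySem.Int.mod (PySem.Int.floordiv ((g - initial) + bs + initial) bs) n = 0)) (0 + initial) :=
  pvEnum_filterMap_sel xs
    (fun i => PySem.Int.mod (PySem.Int.floordiv (i + bs + initial) bs) n = 0) 0 initial

-- ===== VERDICT (by name: the statement is the Claim_ definition above) =====
theorem keep_every_nth_spec : Claim_unchanged_keep_every_nth := by
  intro samples n bs initial _ hPre
  unfold Spec_keep_every_nth
  intro hND
  obtain ⟨hn, hbs⟩ := hPre
  unfold keep_every_nth
  rw [if_neg (show ¬ n ≤ 0 by omega), if_neg (show ¬ bs ≤ 0 by omega)]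
  by_cases hbs1 : bs = 1
  · subst hbs1
    rw [if_pos rfl]
    rw [pvSlice_sel samples n (n - 1 - initial) hn]
    rw [pvAlt_sel samples n 1 initial hn (le_refl 1)]
    conv_rhs => rw [pvSel_shift]
    apply pvSel_congr
    intro k hk1 hk2
    have hL : (0 : Int) < (samples.length : Int) := by omega
    have hnd : ¬ ((initial < 0 ∧ PySem.Int.mod (n - 1 - initial) n < (samples.length : Int)) ∨
        (n ≤ initial ∧ max ((samples.length : Int) + (n - 1 - initial)) 0
          ≠ PySem.Int.mod (n - 1 - initial) n)) :=
      fun hd => hND ⟨rfl, hn, hL, hd⟩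
    rw [PySem.Int.mod_eq_emod_of_pos (show (0 : Int) < n by omega)] at hnd
    have hnd1 : initial < 0 → (samples.length : Int) ≤ (n - 1 - initial) % n := by
      intro h; by_contra hc; exact hnd (Or.inl ⟨h, by omega⟩)
    have hnd2 : n ≤ initial →
        max ((samples.length : Int) + (n - 1 - initial)) 0 = (n - 1 - initial) % n := by
      intro h; by_contra hc; exact hnd (Or.inr ⟨h, hc⟩)
    exact pvPointwise_bs1 (samples.length : Int) n initial k hn (by omega) (by push_cast at hk2; omega)
      hnd1 hnd2
  · rw [if_neg hbs1, pvA_general samples n bs initial, zero_add,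
      pvAlt_sel samples n bs initial hn hbs]
    apply pvSel_congr
    intro k _ _
    have he : k - initial + bs + initial = k + bs := by ring
    simp only [he]

theorem keep_every_nth_changed : Claim_changed_keep_every_nth := by
  unfold Claim_changed_keep_every_nth
  decide
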